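-- pv_equiv track=rewrite | github.com/dudikur/Agents_Architecture-Assignment2 | guardrails.py | _looks_ambiguous_for_safety
-- ===== SOURCE A (Python) =====
-- def _looks_ambiguous_for_safety(text: str) -> bool:
--     lowered = text.lower()
--     sensitive_terms = (
--         "hack",
--         "exploit",
--         "payload",
--         "password",
--         "token",
--         "election",
--         "political",
--         "illegal",
--     )
--     return any(term in lowered for term in sensitive_terms)
-- ===== SOURCE B (Python) =====
-- _SENSITIVE_TERMS = (
--     "hack",
--     "exploit",
--     "payload",
--     "password",
--     "token",
--     "election",
--     "political",
--     "illegal",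
-- )
--
--
-- def _build_trie(terms):
--     root = {}
--     for term in terms:
--         node = root
--         for ch in term:
--             node = node.setdefault(ch, {})
--         node["$"] = True  # end-of-term marker
--     return root
--
--
-- _TRIE = _build_trie(_SENSITIVE_TERMS)
--
--
-- def _looks_ambiguous_for_safety(text: str) -> bool:
--     s = text.lower()
--     n = len(s)
--     for i in range(n):
--         node = _TRIE
--         j = i
--         while True:
--             if "$" in node:
--                 return True
--             if j >= n or s[j] not in node:
--                 break
--             node = node[s[j]]
--             j += 1
--     return False
-- ===== Notes on version B (the rewrite author's own statement) =====
-- stated objective: alternative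
-- what changed: B builds a character trie of the sensitive terms once and scans the lowered text position-by-position, walking the trie over the suffix until an end-of-term marker is reached, instead of A's per-term substring membership tests.
import Mathlib
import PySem

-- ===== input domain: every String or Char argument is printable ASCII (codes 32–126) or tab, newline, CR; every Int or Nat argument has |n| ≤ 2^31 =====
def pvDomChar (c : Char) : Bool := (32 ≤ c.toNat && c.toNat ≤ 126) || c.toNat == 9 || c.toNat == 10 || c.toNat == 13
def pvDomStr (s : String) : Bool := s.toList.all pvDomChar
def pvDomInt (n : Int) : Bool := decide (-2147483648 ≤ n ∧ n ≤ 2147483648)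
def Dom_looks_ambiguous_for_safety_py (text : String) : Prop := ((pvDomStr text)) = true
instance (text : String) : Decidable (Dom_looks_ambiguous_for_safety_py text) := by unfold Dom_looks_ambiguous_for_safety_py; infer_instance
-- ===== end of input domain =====

-- B replaces A's per-term substring tests by a character trie of the terms, built once and walked
-- over each suffix of the lowered text; objective: alternative data structure, same result.

-- ===== PORT A =====
-- literal port: lower the text, then `any(term in lowered for term in sensitive_terms)`
def looks_ambiguous_for_safety_py (text : String) : Bool :=
  let lowered := PySem.Str.lower text
  let sensitive_terms : List String :=
    ["hack", "exploit", "payload", "password", "token", "election", "political", "illegal"]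
  sensitive_terms.any (fun term => PySem.Str.isIn term lowered)

-- ===== PORT B =====
-- Source B's dict-of-dicts trie: a node is an end-of-term mark ("$" in the dict) plus child edges
-- (association list in insertion order, like the Python dict)
mutual
inductive PvTrie where
  | node : Bool → PvEdges → PvTrie
deriving DecidableEq
inductive PvEdges where
  | nil : PvEdges
  | cons : Char → PvTrie → PvEdges → PvEdges
deriving DecidableEq
end

def PvEdges.find? : PvEdges → Char → Option PvTrie
  | .nil, _ => none
  | .cons c' t rest, c => if c' = c then some t else rest.find? c

-- node.setdefault(ch, {}) then overwrite: replace the child at c in place, or append a new edge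
def PvEdges.set : PvEdges → Char → PvTrie → PvEdges
  | .nil, c, t => .cons c t .nil
  | .cons c' t' rest, c, t => if c' = c then .cons c' t rest else .cons c' t' (rest.set c t)

def pvEmptyTrie : PvTrie := .node false .nil

-- the inner loop of Source B's _build_trie: walk/extend the trie along one term, mark its end
def PvTrie.insert : PvTrie → List Char → PvTrie
  | .node _ es, [] => .node true es
  | .node e es, c :: cs =>
      .node e (es.set c (((es.find? c).getD pvEmptyTrie).insert cs))

-- Source B's trie, built by inserting each term into an initially empty root
def pvTrie : PvTrie :=
  (["hack", "exploit", "payload", "password", "token", "election", "political",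
    "illegal"].map String.toList).foldl PvTrie.insert pvEmptyTrie

-- Source B's inner `while True` walk from one start position: stop with True at a "$" mark,
-- otherwise follow the edge for the next character (break = false when absent or text exhausted)
def PvTrie.walk : PvTrie → List Char → Bool
  | .node e _, [] => e
  | .node e es, c :: cs =>
      e || (match es.find? c with
            | none => false
            | some t => t.walk cs)

-- Source B's outer `for i in range(n)` loop: try a trie walk at every start position
def pvScanT (tr : PvTrie) : List Char → Bool
  | [] => false
  | c :: rest => tr.walk (c :: rest) || pvScanT tr rest

def looks_ambiguous_for_safety_py_alt (text : String) : Bool :=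
  pvScanT pvTrie (PySem.Chars.lower text.toList)

-- ===== PRECONDITION & SPEC =====
def Spec_looks_ambiguous_for_safety_py (text : String) (out : Bool) : Prop := out = looks_ambiguous_for_safety_py_alt text
instance (text : String) (out : Bool) : Decidable (Spec_looks_ambiguous_for_safety_py text out) := by unfold Spec_looks_ambiguous_for_safety_py; infer_instance

-- ===== CLAIM (what is proved, stated in full; the proofs are below) =====
def Claim_equal_looks_ambiguous_for_safety_py : Prop := ∀ (text : String), Dom_looks_ambiguous_for_safety_py text → Spec_looks_ambiguous_for_safety_py text (looks_ambiguous_for_safety_py text)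

-- ===== LEMMAS AND PROOFS =====

-- (structural-recursion proofs: `induction` does not support the mutual inductive PvEdges)
lemma pvEdges_find?_set_self : ∀ (es : PvEdges) (c : Char) (t : PvTrie),
    (es.set c t).find? c = some t
  | .nil, c, t => by simp [PvEdges.set, PvEdges.find?]
  | .cons c' t' rest, c, t => by
      by_cases h : c' = c <;>
        simp [PvEdges.set, PvEdges.find?, h, pvEdges_find?_set_self rest c t]

lemma pvEdges_find?_set_ne : ∀ (es : PvEdges) (c c₀ : Char) (t : PvTrie), c ≠ c₀ →
    (es.set c t).find? c₀ = es.find? c₀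
  | .nil, c, c₀, t, h => by simp [PvEdges.set, PvEdges.find?, h]
  | .cons c' t' rest, c, c₀, t, h => by
      by_cases h' : c' = c
      · subst h'; simp [PvEdges.set, PvEdges.find?, h]
      · simp [PvEdges.set, PvEdges.find?, h', pvEdges_find?_set_ne rest c c₀ t h]

lemma pvEmptyTrie_walk (s : List Char) : pvEmptyTrie.walk s = false := by
  cases s <;> simp [pvEmptyTrie, PvTrie.walk, PvEdges.find?]

-- inserting a word into a trie adds exactly its prefixes-match to the walk
lemma pvWalk_insert (w : List Char) : ∀ (tr : PvTrie) (s : List Char),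
    (tr.insert w).walk s = (w.isPrefixOf s || tr.walk s) := by
  induction w with
  | nil =>
      rintro ⟨e, es⟩ s
      cases s <;> simp [PvTrie.insert, PvTrie.walk, List.isPrefixOf]
  | cons a as ih =>
      rintro ⟨e, es⟩ s
      cases s with
      | nil => simp [PvTrie.insert, PvTrie.walk, List.isPrefixOf]
      | cons c cs =>
          by_cases h : a = c
          · subst h
            simp only [PvTrie.insert, PvTrie.walk, pvEdges_find?_set_self, ih,
              List.isPrefixOf]
            cases es.find? a with
            | none => simp [pvEmptyTrie_walk, Bool.or_comm]
            | some t => simp [Bool.or_left_comm]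
          · simp [PvTrie.insert, PvTrie.walk, pvEdges_find?_set_ne _ _ _ _ h,
              List.isPrefixOf, h]

lemma pvWalk_foldl (l : List (List Char)) (tr : PvTrie) (s : List Char) :
    (l.foldl PvTrie.insert tr).walk s = (l.any (·.isPrefixOf s) || tr.walk s) := by
  induction l generalizing tr with
  | nil => simp
  | cons w ws ih =>
      simp only [List.foldl_cons, List.any_cons, ih, pvWalk_insert]
      rw [Bool.or_left_comm, ← Bool.or_assoc]

lemma pvWalk_pvTrie (s : List Char) :
    pvTrie.walk s
      = (["hack", "exploit", "payload", "password", "token", "election", "political",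
          "illegal"].map String.toList).any (·.isPrefixOf s) := by
  unfold pvTrie
  rw [pvWalk_foldl]
  simp [pvEmptyTrie_walk]

-- the outer scan finds a walk-match at some (nonempty) suffix
lemma pvScanT_iff (tr : PvTrie) (h0 : tr.walk [] = false) (s : List Char) :
    pvScanT tr s = true ↔ ∃ u, u <:+ s ∧ tr.walk u = true := by
  induction s with
  | nil =>
      simp only [pvScanT, Bool.false_eq_true, false_iff]
      rintro ⟨u, hu, hw⟩
      rw [List.suffix_nil.mp hu] at hw
      simp [h0] at hw
  | cons c rest ih =>
      simp only [pvScanT, Bool.or_eq_true, ih]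
      constructor
      · rintro (hw | ⟨u, hu, hw⟩)
        · exact ⟨c :: rest, List.suffix_refl _, hw⟩
        · exact ⟨u, hu.trans (List.suffix_cons c rest), hw⟩
      · rintro ⟨u, hu, hw⟩
        rcases List.suffix_cons_iff.mp hu with h | h
        · subst h; exact Or.inl hw
        · exact Or.inr ⟨u, h, hw⟩

-- ===== VERDICT (by name: the statement is the Claim_ definition above) =====
theorem looks_ambiguous_for_safety_py_spec : Claim_equal_looks_ambiguous_for_safety_py := by
  intro text _
  show _ = _
  unfold looks_ambiguous_for_safety_py looks_ambiguous_for_safety_py_alt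
  rw [Bool.eq_iff_iff]
  have h0 : pvTrie.walk [] = false := by decide
  rw [pvScanT_iff pvTrie h0]
  simp only [List.any_eq_true, PySem.Str.isIn_eq, PySem.Chars.isIn_iff_infix,
    PySem.Str.toList_lower, pvWalk_pvTrie, List.mem_map, List.isPrefixOf_iff_prefix]
  constructor
  · rintro ⟨t, ht, hinf⟩
    obtain ⟨u, hpre, hsuf⟩ := List.infix_iff_prefix_suffix.mp hinf
    exact ⟨u, hsuf, t.toList, ⟨t, ht, rfl⟩, hpre⟩
  · rintro ⟨u, hsuf, w, ⟨t, ht, rfl⟩, hpre⟩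
    exact ⟨t, ht, List.infix_iff_prefix_suffix.mpr ⟨u, hpre, hsuf⟩⟩
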